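-- pv_equiv track=rewrite | github.com/WSUCptSCapstone-Fall2022Spring2023/wsulibraries-accessibilityapps | accessibility_apps/utils/harvest/document_layout.py | prep_str
-- ===== SOURCE A (Python) =====
-- def prep_str(iptext):
--     iptext = iptext.lower()
--     iptext = iptext.replace(".","")
--     import string
--
--     for punc in string.punctuation:
--         iptext = iptext.replace(punc,"")
--
--     iptext = iptext.replace("’","")
--     iptext = iptext.replace(" ","")
--     iptext = iptext.replace("\n", "")
--     iptext = iptext.replace("…","")
--
--     for i in range(10):
--         iptext = iptext.replace(str(i), "")
--
--     return iptext
-- ===== SOURCE B (Python) =====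
-- import string
--
-- _REMOVED = set(string.punctuation) | {'’', ' ', '\n', '…'} | set(string.digits)
--
--
-- def prep_str(iptext):
--     # one filtering pass over the lowercased text against a precomputed removal set
--     return ''.join(c for c in iptext.lower() if c not in _REMOVED)
-- ===== Notes on version B (the rewrite author's own statement) =====
-- stated objective: alternative
-- what changed: Replaces A's ~44 successive whole-string .replace() scans with one precomputed removal set and a single filtering pass over the lowercased string.
import Mathlib
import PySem

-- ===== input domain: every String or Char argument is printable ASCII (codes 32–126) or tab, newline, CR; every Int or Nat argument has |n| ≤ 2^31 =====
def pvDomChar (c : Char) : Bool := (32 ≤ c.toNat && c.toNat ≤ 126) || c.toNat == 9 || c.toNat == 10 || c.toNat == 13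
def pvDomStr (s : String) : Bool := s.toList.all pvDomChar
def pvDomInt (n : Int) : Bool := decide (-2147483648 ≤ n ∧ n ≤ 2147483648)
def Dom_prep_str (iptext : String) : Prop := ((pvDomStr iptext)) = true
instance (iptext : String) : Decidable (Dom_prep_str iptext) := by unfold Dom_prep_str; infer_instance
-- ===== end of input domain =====

-- B replaces A's ~44 successive whole-string .replace() scans with one precomputed
-- removal set and a single filtering pass over the lowercased string (objective: alternative).

-- ===== PORT A =====
-- string.punctuation
def pyPunctuation : String := "!\"#$%&'()*+,-./:;<=>?@[\\]^_`{|}~"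

def prep_str (iptext : String) : String :=
  let t0 := PySem.Str.lower iptext
  let t1 := PySem.Str.replace t0 "." ""
  let t2 := pyPunctuation.toList.foldl (fun s p => PySem.Str.replace s (String.ofList [p]) "") t1
  let t3 := PySem.Str.replace t2 "’" ""
  let t4 := PySem.Str.replace t3 " " ""
  let t5 := PySem.Str.replace t4 "\n" ""
  let t6 := PySem.Str.replace t5 "…" ""
  (PySem.List.pyRange 0 10 1).foldl (fun s i => PySem.Str.replace s (PySem.Int.toStr i) "") t6

-- ===== PORT B =====
-- _REMOVED = set(string.punctuation) | {'’', ' ', '\n', '…'} | set(string.digits)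
def pvRemoved : PySem.Set Char :=
  PySem.Set.union
    (PySem.Set.union (PySem.Set.ofList pyPunctuation.toList) ['’', ' ', '\n', '…'])
    ("0123456789".toList)

def prep_str_alt (iptext : String) : String :=
  String.ofList (((PySem.Str.lower iptext).toList).filter
    (fun c => !(PySem.Set.contains pvRemoved c)))

-- ===== PRECONDITION & SPEC =====
def Spec_prep_str (iptext : String) (out : String) : Prop := out = prep_str_alt iptext
instance (iptext : String) (out : String) : Decidable (Spec_prep_str iptext out) := by unfold Spec_prep_str; infer_instance

-- ===== CLAIM (what is proved, stated in full; the proofs are below) =====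
def Claim_equal_prep_str : Prop := ∀ (iptext : String), Dom_prep_str iptext → Spec_prep_str iptext (prep_str iptext)

-- ===== LEMMAS AND PROOFS =====

-- replace with a single-char pattern and empty replacement is a filter
lemma replace_go_single (c : Char) :
    ∀ (l : List Char) (fuel : Nat) (acc : List Char), l.length ≤ fuel →
      PySem.Chars.replace.go [c] [] fuel l acc
        = acc.reverse ++ l.filter (fun x => !(x == c)) := by
  intro l
  induction l with
  | nil =>
    intro fuel acc _
    cases fuel <;> simp [PySem.Chars.replace.go]
  | cons h t ih =>
    intro fuel acc hle
    cases fuel with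
    | zero => simp at hle
    | succ n =>
      by_cases hc : h = c
      · subst hc
        simp only [PySem.Chars.replace.go, List.isPrefixOf, BEq.rfl, Bool.true_and,
          if_true, List.length_cons, List.length_nil, List.drop_succ_cons,
          List.drop_zero, List.reverse_nil, List.nil_append]
        rw [ih n acc (by simpa using hle)]
        simp
      · have hbe : (c == h) = false := by simp [Ne.symm hc]
        simp only [PySem.Chars.replace.go, List.isPrefixOf, hbe, Bool.false_and,
          Bool.false_eq_true, if_false]
        rw [ih n (h :: acc) (by simpa using Nat.le_of_succ_le_succ hle)]
        simp [hc]

lemma replace_single (c : Char) (l : List Char) :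
    PySem.Chars.replace l [c] [] = l.filter (fun x => !(x == c)) := by
  simp only [PySem.Chars.replace, List.isEmpty_cons, if_false, Bool.false_eq_true]
  simpa using replace_go_single c l l.length [] le_rfl

lemma str_replace_single (c : Char) (s : String) :
    (PySem.Str.replace s (String.ofList [c]) "").toList
      = s.toList.filter (fun x => !(x == c)) := by
  rw [PySem.Str.toList_replace, String.toList_ofList]
  have h2 : ("" : String).toList = [] := rfl
  rw [h2, replace_single]

-- appending one more removed character to an already-applied removal list
lemma filter_chain (c : Char) (L l : List Char) :
    (l.filter (fun x => !(L.contains x))).filter (fun x => !(x == c))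
      = l.filter (fun x => !((L ++ [c]).contains x)) := by
  rw [List.filter_filter]
  apply List.filter_congr
  intro x _
  simp [Bool.not_or, Bool.and_comm, Bool.beq_eq_decide_eq]

-- one single-char replace applied to an already-filtered string
lemma replace_step (c : Char) (L l : List Char) (s : String)
    (h : s.toList = l.filter (fun x => !(L.contains x))) :
    (PySem.Str.replace s (String.ofList [c]) "").toList
      = l.filter (fun x => !((L ++ [c]).contains x)) := by
  rw [str_replace_single, h, filter_chain]

-- folding single-char replaces over a list of characters removes all of them
lemma foldl_replace_filter (ps : List Char) :
    ∀ (L l : List Char) (s : String),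
      s.toList = l.filter (fun x => !(L.contains x)) →
      (ps.foldl (fun s p => PySem.Str.replace s (String.ofList [p]) "") s).toList
        = l.filter (fun x => !((L ++ ps).contains x)) := by
  induction ps with
  | nil => intro L l s h; simpa using h
  | cons p ps ih =>
    intro L l s h
    simp only [List.foldl_cons]
    rw [ih (L ++ [p]) l _ (replace_step p L l s h)]
    simp

-- the list of characters A removes, in A's application order
def pvALit : List Char :=
  ['.'] ++ pyPunctuation.toList ++ ['’'] ++ [' '] ++ ['\n'] ++ ['…']
    ++ ['0'] ++ ['1'] ++ ['2'] ++ ['3'] ++ ['4'] ++ ['5'] ++ ['6'] ++ ['7'] ++ ['8'] ++ ['9']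

lemma prep_str_toList (iptext : String) :
    (prep_str iptext).toList
      = (PySem.Str.lower iptext).toList.filter (fun x => !(pvALit.contains x)) := by
  unfold prep_str
  have h1 : (PySem.Str.replace (PySem.Str.lower iptext) "." "").toList
      = (PySem.Str.lower iptext).toList.filter
          (fun x => !((['.'] : List Char).contains x)) := by
    have e : ("." : String) = String.ofList ['.'] := by decide
    rw [e, str_replace_single]
    simp [Bool.beq_eq_decide_eq]
  have h2 := foldl_replace_filter pyPunctuation.toList ['.']
    (PySem.Str.lower iptext).toList _ h1
  have e3 : ("’" : String) = String.ofList ['’'] := by decide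
  have e4 : (" " : String) = String.ofList [' '] := by decide
  have e5 : ("\n" : String) = String.ofList ['\n'] := by decide
  have e6 : ("…" : String) = String.ofList ['…'] := by decide
  rw [e3, e4, e5, e6]
  have h3 := replace_step '’' _ _ _ h2
  have h4 := replace_step ' ' _ _ _ h3
  have h5 := replace_step '\n' _ _ _ h4
  have h6 := replace_step '…' _ _ _ h5
  have hr : PySem.List.pyRange 0 10 1 = [0,1,2,3,4,5,6,7,8,9] := by decide
  rw [hr]
  simp only [List.foldl_cons, List.foldl_nil]
  have d0 : PySem.Int.toStr 0 = String.ofList ['0'] := by decide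
  have d1 : PySem.Int.toStr 1 = String.ofList ['1'] := by decide
  have d2 : PySem.Int.toStr 2 = String.ofList ['2'] := by decide
  have d3 : PySem.Int.toStr 3 = String.ofList ['3'] := by decide
  have d4 : PySem.Int.toStr 4 = String.ofList ['4'] := by decide
  have d5 : PySem.Int.toStr 5 = String.ofList ['5'] := by decide
  have d6 : PySem.Int.toStr 6 = String.ofList ['6'] := by decide
  have d7 : PySem.Int.toStr 7 = String.ofList ['7'] := by decide
  have d8 : PySem.Int.toStr 8 = String.ofList ['8'] := by decide
  have d9 : PySem.Int.toStr 9 = String.ofList ['9'] := by decide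
  rw [d0, d1, d2, d3, d4, d5, d6, d7, d8, d9]
  have g0 := replace_step '0' _ _ _ h6
  have g1 := replace_step '1' _ _ _ g0
  have g2 := replace_step '2' _ _ _ g1
  have g3 := replace_step '3' _ _ _ g2
  have g4 := replace_step '4' _ _ _ g3
  have g5 := replace_step '5' _ _ _ g4
  have g6 := replace_step '6' _ _ _ g5
  have g7 := replace_step '7' _ _ _ g6
  have g8 := replace_step '8' _ _ _ g7
  have g9 := replace_step '9' _ _ _ g8
  rw [g9]
  rfl

-- the two removal lists contain the same characters ('.' is listed twice by A)
set_option maxRecDepth 8192 in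
set_option maxHeartbeats 1000000 in
lemma contains_A_eq_B (x : Char) :
    List.contains pvALit x = List.contains pvRemoved x := by
  have hred : pvRemoved = pyPunctuation.toList ++ ['’', ' ', '\n', '…']
      ++ "0123456789".toList := by decide
  have hdot : ('.' : Char) ∈ pyPunctuation.toList := by decide
  have hd : "0123456789".toList = ['0','1','2','3','4','5','6','7','8','9'] := by decide
  rw [hred, hd]
  simp only [List.contains_eq_mem]
  rw [decide_eq_decide]
  have hx : x = '.' → x ∈ pyPunctuation.toList := fun h => h ▸ hdot
  simp only [pvALit, List.mem_append, List.mem_cons, List.not_mem_nil, or_false, or_assoc]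
  constructor
  · rintro (h | h) <;> tauto
  · intro h; tauto

-- ===== VERDICT (by name: the statement is the Claim_ definition above) =====
theorem prep_str_spec : Claim_equal_prep_str := by
  intro iptext _
  show prep_str iptext = prep_str_alt iptext
  apply String.toList_inj.mp
  rw [prep_str_toList]
  unfold prep_str_alt
  rw [String.toList_ofList]
  apply List.filter_congr
  intro x _
  simp only [PySem.Set.contains, contains_A_eq_B]
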